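-- pv_equiv track=rewrite | github.com/MrBrantCode/unitest_baseline | mut_generate/mist_train_cf/cf_81372/solution.py | product_of_primes
-- ===== SOURCE A (Python) =====
-- def product_of_primes(array):
--     def is_prime(n):
--         if n <= 1:
--             return False
--         if n == 2:
--             return True
--         if n % 2 == 0:
--             return False
--         i = 3
--         while i * i <= n:
--             if n % i == 0:
--                 return False
--             i += 2
--         return True
--
--     product = 1
--     for num in array:
--         if is_prime(num):
--             product *= num
--     return product
-- ===== SOURCE B (Python) =====
-- def product_of_primes(array):
--     # Largest candidate value (at least 1).
--     top = 1
--     for num in array: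
--         if num > top:
--             top = num
--     # Integer square root of top by counting up.
--     limit = 1
--     while (limit + 1) * (limit + 1) <= top:
--         limit += 1
--     # Sieve of Eratosthenes up to limit: every prime that could witness
--     # compositeness of a candidate in the array.
--     comp = [False] * (limit + 1)
--     primes = []
--     for p in range(2, limit + 1):
--         if not comp[p]:
--             primes.append(p)
--             for m in range(p * p, limit + 1, p):
--                 comp[m] = True
--
--     def is_prime(n):
--         if n < 2:
--             return False
--         return all(n % p != 0 for p in primes if p * p <= n)
--
--     product = 1
--     for num in array:
--         if is_prime(num):
--             product *= num
--     return product
-- ===== Notes on version B (the rewrite author's own statement) =====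
-- stated objective: alternative
-- what changed: Instead of trial-dividing each element up to its square root, B computes the maximum candidate, sieves all primes up to its integer square root once with a sieve of Eratosthenes, and tests each element only against those sieved primes.
import Mathlib
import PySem

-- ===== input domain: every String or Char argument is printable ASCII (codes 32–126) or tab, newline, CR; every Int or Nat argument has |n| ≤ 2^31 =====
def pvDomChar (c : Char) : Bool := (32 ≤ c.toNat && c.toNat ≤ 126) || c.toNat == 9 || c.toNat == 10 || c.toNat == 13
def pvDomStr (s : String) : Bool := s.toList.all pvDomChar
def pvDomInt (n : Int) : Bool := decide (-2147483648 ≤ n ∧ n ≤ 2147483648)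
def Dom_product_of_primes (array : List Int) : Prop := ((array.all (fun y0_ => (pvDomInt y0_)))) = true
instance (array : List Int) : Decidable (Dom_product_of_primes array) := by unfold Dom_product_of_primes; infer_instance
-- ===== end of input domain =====

-- B replaces A's per-element trial division by a shared sieve of Eratosthenes up to
-- isqrt(max(array)): each element is then tested only against the sieved primes;
-- alternative algorithm, no speed claim.

-- ===== PORT A =====
-- A's inner while loop: i = 3; while i*i <= n: if n % i == 0: return False; i += 2; return True
def primeLoopA (n i : Int) : Bool :=
  if _h : i * i ≤ n then
    if PySem.Int.mod n i == 0 then false else primeLoopA n (i + 2)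
  else true
termination_by (n + 2 - i).toNat
decreasing_by
  have hn : (0:Int) ≤ n := le_trans (mul_self_nonneg i) _h
  have hi : i ≤ n + 1 := by
    by_cases h1 : i ≤ 1
    · omega
    · have : i ≤ i * i := by nlinarith
      omega
  omega

def isPrimeA (n : Int) : Bool :=
  if n ≤ 1 then false
  else if n == 2 then true
  else if PySem.Int.mod n 2 == 0 then false
  else primeLoopA n 3

def product_of_primes (array : List Int) : Int :=
  array.foldl (fun product num => if isPrimeA num then product * num else product) 1

-- ===== PORT B =====
-- top = 1; for num in array: if num > top: top = num
def topOf (array : List Int) : Int :=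
  array.foldl (fun top num => if num > top then num else top) 1

-- limit = 1; while (limit+1)*(limit+1) <= top: limit += 1
def limitLoop (top l : Int) : Int :=
  if h : (l + 1) * (l + 1) ≤ top then limitLoop top (l + 1) else l
termination_by (top + 1 - l).toNat
decreasing_by
  have hnn : (0:Int) ≤ top := le_trans (mul_self_nonneg (l + 1)) h
  have : l < top + 1 := by
    by_cases h0 : l + 1 ≤ 0
    · omega
    · nlinarith
  omega

-- for m in range(p*p, limit+1, p): comp[m] = True   (every index is in range;
-- setIfInBounds is exact for Python's in-range list assignment)
def markMultiples (limit p : Int) (comp : Array Bool) : Array Bool :=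
  (PySem.List.pyRange (p * p) (limit + 1) p).foldl
    (fun c m => c.setIfInBounds m.toNat true) comp

-- one iteration of: if not comp[p]: primes.append(p); mark multiples
def sieveStep (limit : Int) (st : Array Bool × List Int) (p : Int) : Array Bool × List Int :=
  if st.1.getD p.toNat false = false then
    (markMultiples limit p st.1, st.2 ++ [p])
  else st

-- comp = [False]*(limit+1); primes = []; for p in range(2, limit+1): …
def sievePrimes (limit : Int) : List Int :=
  ((PySem.List.pyRange 2 (limit + 1) 1).foldl (sieveStep limit)
    (Array.replicate (limit + 1).toNat false, [])).2

-- def is_prime(n): if n < 2: return False; return all(n % p != 0 for p in primes if p*p <= n)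
def isPrimeB (primes : List Int) (n : Int) : Bool :=
  if n < 2 then false
  else (primes.filter (fun p => decide (p * p ≤ n))).all (fun p => PySem.Int.mod n p != 0)

def product_of_primes_alt (array : List Int) : Int :=
  let top := topOf array
  let limit := limitLoop top 1
  let primes := sievePrimes limit
  array.foldl (fun product num => if isPrimeB primes num then product * num else product) 1

-- ===== PRECONDITION & SPEC =====
def Spec_product_of_primes (array : List Int) (out : Int) : Prop := out = product_of_primes_alt array
instance (array : List Int) (out : Int) : Decidable (Spec_product_of_primes array out) := by unfold Spec_product_of_primes; infer_instance

-- ===== CLAIM (what is proved, stated in full; the proofs are below) =====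
def Claim_equal_product_of_primes : Prop := ∀ (array : List Int), Dom_product_of_primes array → Spec_product_of_primes array (product_of_primes array)

-- ===== LEMMAS AND PROOFS =====

-- ints that pass every trial division d with 2 ≤ d < p
def IsPrimeI (p : Int) : Prop := 2 ≤ p ∧ ∀ d : Int, 2 ≤ d → d < p → ¬ d ∣ p

theorem isPrimeI_iff_natPrime (p : Int) (h2 : 2 ≤ p) : IsPrimeI p ↔ Nat.Prime p.toNat := by
  rw [Nat.prime_def_lt]
  constructor
  · intro ⟨_, hp⟩
    refine ⟨by omega, ?_⟩
    intro m hm hdvd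
    by_contra hm1
    have hm2 : 2 ≤ m := by
      rcases Nat.eq_zero_or_pos m with h0 | h0
      · subst h0
        have : p.toNat = 0 := Nat.eq_zero_of_zero_dvd hdvd
        omega
      · omega
    have hdvdZ : (m : Int) ∣ p := by
      have : (m : Int) ∣ (p.toNat : Int) := Int.natCast_dvd_natCast.mpr hdvd
      rwa [Int.toNat_of_nonneg (by omega)] at this
    exact hp m (by exact_mod_cast hm2) (by omega) hdvdZ
  · intro ⟨_, hp⟩
    refine ⟨h2, ?_⟩
    intro d hd2 hdp hdvd
    have hdvdN : d.toNat ∣ p.toNat := by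
      have : ((d.toNat : Int)) ∣ ((p.toNat : Int)) := by
        rw [Int.toNat_of_nonneg (by omega : (0:Int) ≤ d), Int.toNat_of_nonneg (by omega : (0:Int) ≤ p)]
        exact hdvd
      exact_mod_cast this
    have := hp d.toNat (by omega) hdvdN
    omega

theorem exists_small_prime_factor (n d : Int) (hd2 : 2 ≤ d) (hdd : d * d ≤ n) (hdvd : d ∣ n) :
    ∃ q : Int, IsPrimeI q ∧ q * q ≤ n ∧ q ∣ n := by
  refine ⟨(d.toNat.minFac : Int), ?_, ?_, ?_⟩
  · have hprime : Nat.Prime d.toNat.minFac := Nat.minFac_prime (by omega)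
    rw [isPrimeI_iff_natPrime _ (by exact_mod_cast hprime.two_le)]
    simpa using hprime
  · have hle : d.toNat.minFac ≤ d.toNat := Nat.minFac_le (by omega)
    have hleZ : (d.toNat.minFac : Int) ≤ d := by
      have := Int.toNat_of_nonneg (by omega : (0:Int) ≤ d)
      omega
    nlinarith [Nat.cast_nonneg (α := Int) d.toNat.minFac]
  · have hq : (d.toNat.minFac : Int) ∣ d := by
      have : ((d.toNat.minFac : Int)) ∣ ((d.toNat : Int)) := Int.natCast_dvd_natCast.mpr (Nat.minFac_dvd _)
      rwa [Int.toNat_of_nonneg (by omega : (0:Int) ≤ d)] at this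
    exact dvd_trans hq hdvd

-- characterisation of A's inner loop, for odd n ≥ 3, odd i ≥ 3
theorem primeLoopA_iff (n : Int) :
    ∀ (k : Nat) (i : Int), (n + 2 - i).toNat ≤ k → 3 ≤ i → i % 2 = 1 →
      (primeLoopA n i = true ↔ ∀ j : Int, i ≤ j → j * j ≤ n → j % 2 = 1 → ¬ j ∣ n) := by
  intro k
  induction k with
  | zero =>
    intro i hk h3 _
    rw [primeLoopA]
    have hii : ¬ i * i ≤ n := by
      intro h
      have : i ≤ i * i := by nlinarith
      omega
    rw [dif_neg hii]
    simp only [true_iff]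
    intro j hj hjj _
    have : i * i ≤ j * j := by nlinarith
    omega
  | succ k ih =>
    intro i hk h3 hodd
    rw [primeLoopA]
    split
    · rename_i hii
      have hn0 : 0 ≤ n := le_trans (mul_self_nonneg i) hii
      split
      · rename_i hmod
        simp only [beq_iff_eq] at hmod
        have hdvd : i ∣ n := (PySem.Int.mod_eq_zero_iff_dvd n i).mp hmod
        apply iff_of_false (by simp)
        exact fun hall => hall i le_rfl hii hodd hdvd
      · rename_i hmod
        simp only [beq_iff_eq] at hmod
        have hndvd : ¬ i ∣ n := fun h => hmod ((PySem.Int.mod_eq_zero_iff_dvd n i).mpr h)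
        have hile : i ≤ n := by nlinarith
        rw [ih (i + 2) (by omega) (by omega) (by omega)]
        constructor
        · intro h j hj hjj hjodd hjdvd
          by_cases hge : i + 2 ≤ j
          · exact h j hge hjj hjodd hjdvd
          · have : j = i := by omega
            exact hndvd (this ▸ hjdvd)
        · intro h j hj hjj hjodd
          exact h j (by omega) hjj hjodd
    · rename_i hii
      simp only [true_iff]
      intro j hj hjj _
      have : i * i ≤ j * j := by nlinarith
      omega

theorem isPrimeA_iff (n : Int) :
    isPrimeA n = true ↔ 2 ≤ n ∧ ∀ d : Int, 2 ≤ d → d * d ≤ n → ¬ d ∣ n := by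
  unfold isPrimeA
  by_cases h1 : n ≤ 1
  · rw [if_pos h1]
    simp only [Bool.false_eq_true, false_iff]
    intro h
    omega
  · rw [if_neg h1]
    by_cases h2 : n = 2
    · subst h2
      norm_num
      intro d hd hdd
      nlinarith
    · rw [if_neg (by simp [h2])]
      rw [PySem.Int.mod_eq_emod_of_pos (by omega : (0:Int) < 2)]
      by_cases heven : n % 2 = 0
      · rw [if_pos (by simpa using heven)]
        simp only [Bool.false_eq_true, false_iff]
        intro h
        exact h.2 2 le_rfl (by omega) (Int.dvd_of_emod_eq_zero heven)
      · rw [if_neg (by simpa using heven)]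
        have hodd : n % 2 = 1 := by omega
        rw [primeLoopA_iff n (n + 2 - 3).toNat 3 le_rfl (by omega) (by omega)]
        constructor
        · intro h
          refine ⟨by omega, ?_⟩
          intro d hd2 hdd hdvd
          rcases Int.emod_two_eq d with hde | hdo
          · have h2d : (2:Int) ∣ d := Int.dvd_of_emod_eq_zero hde
            have h2n : (2:Int) ∣ n := dvd_trans h2d hdvd
            omega
          · exact h d (by omega) hdd hdo hdvd
        · intro h j h3j hjj hjodd
          exact h.2 j (by omega) hjj

theorem topOf_fold_spec (l : List Int) :
    ∀ t : Int, t ≤ l.foldl (fun top num => if num > top then num else top) t ∧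
      ∀ num ∈ l, num ≤ l.foldl (fun top num => if num > top then num else top) t := by
  induction l with
  | nil => intro t; simp
  | cons x xs ih =>
    intro t
    simp only [List.foldl_cons, List.mem_cons]
    constructor
    · calc t ≤ if x > t then x else t := by split <;> omega
        _ ≤ _ := (ih _).1
    · intro num hnum
      rcases hnum with rfl | hnum
      · calc num ≤ if num > t then num else t := by split <;> omega
          _ ≤ _ := (ih _).1
      · exact (ih _).2 num hnum

theorem topOf_spec (array : List Int) :
    1 ≤ topOf array ∧ ∀ num ∈ array, num ≤ topOf array := topOf_fold_spec array 1

theorem limitLoop_spec (top l : Int) :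
    l ≤ limitLoop top l ∧ ¬ ((limitLoop top l + 1) * (limitLoop top l + 1) ≤ top) := by
  induction l using limitLoop.induct top with
  | case1 l h ih =>
    rw [limitLoop, dif_pos h]
    exact ⟨by omega, ih.2⟩
  | case2 l h =>
    rw [limitLoop, dif_neg h]
    exact ⟨le_refl l, h⟩

-- pointwise description of a single in-bounds boolean write
theorem getD_setIB (c : Array Bool) (i j : Nat) (v : Bool) :
    (c.setIfInBounds i v).getD j false =
      if i = j ∧ j < c.size then v else c.getD j false := by
  simp only [Array.getD_eq_getD_getElem?, Array.getElem?_setIfInBounds]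
  by_cases hij : i = j
  · subst hij
    by_cases hs : i < c.size
    · simp [hs]
    · simp [hs]
  · simp [hij]

theorem markFold_size (L : List Int) (c : Array Bool) :
    (L.foldl (fun c m => c.setIfInBounds m.toNat true) c).size = c.size := by
  induction L generalizing c with
  | nil => rfl
  | cons x L ih => simp [List.foldl_cons, ih, Array.size_setIfInBounds]

theorem markFold_getD (L : List Int) (c : Array Bool) (j : Nat) :
    ((L.foldl (fun c m => c.setIfInBounds m.toNat true) c).getD j false = true) ↔
      (c.getD j false = true ∨ ∃ m ∈ L, m.toNat = j ∧ j < c.size) := by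
  induction L generalizing c with
  | nil => simp
  | cons x L ih =>
    simp only [List.foldl_cons]
    rw [ih]
    rw [getD_setIB]
    simp only [Array.size_setIfInBounds, List.mem_cons]
    constructor
    · rintro (h | ⟨m, hm, hj, hsz⟩)
      · split_ifs at h with hx
        · exact Or.inr ⟨x, Or.inl rfl, hx.1, hx.2⟩
        · exact Or.inl h
      · exact Or.inr ⟨m, Or.inr hm, hj, hsz⟩
    · rintro (h | ⟨m, rfl | hm, hj, hsz⟩)
      · left
        split_ifs with hx
        · rfl
        · exact h
      · left
        rw [if_pos ⟨hj, hsz⟩]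
      · exact Or.inr ⟨m, hm, hj, hsz⟩

theorem markMultiples_getD (limit p : Int) (comp : Array Bool)
    (hp : 2 ≤ p) (hsz : comp.size = (limit + 1).toNat) (m : Int) (h0 : 0 ≤ m) (hm : m ≤ limit) :
    ((markMultiples limit p comp).getD m.toNat false = true) ↔
      (comp.getD m.toNat false = true ∨ (p ∣ m ∧ p * p ≤ m)) := by
  unfold markMultiples
  rw [markFold_getD]
  constructor
  · rintro (h | ⟨m', hm', hj, _⟩)
    · exact Or.inl h
    · rw [PySem.List.mem_pyRange_iff_of_pos (by omega) m'] at hm'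
      obtain ⟨hlo, hhi, hdvd⟩ := hm'
      have hm'0 : 0 ≤ m' := by nlinarith
      have : m' = m := by omega
      subst this
      refine Or.inr ⟨?_, hlo⟩
      obtain ⟨c, hc⟩ := hdvd
      exact ⟨p + c, by linarith [hc]⟩
  · rintro (h | ⟨hdvd, hpp⟩)
    · exact Or.inl h
    · refine Or.inr ⟨m, ?_, rfl, by omega⟩
      rw [PySem.List.mem_pyRange_iff_of_pos (by omega) m]
      refine ⟨hpp, by omega, ?_⟩
      obtain ⟨c, hc⟩ := hdvd
      exact ⟨c - p, by linarith [hc]⟩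

-- the sieve state after processing p = 2 .. k-1
def sieveState (limit k : Int) : Array Bool × List Int :=
  (PySem.List.pyRange 2 k 1).foldl (sieveStep limit)
    (Array.replicate (limit + 1).toNat false, [])

theorem sieveState_succ (limit k : Int) (h2 : 2 ≤ k) :
    sieveState limit (k + 1) = sieveStep limit (sieveState limit k) k := by
  unfold sieveState
  rw [PySem.List.pyRange_one_succ_right h2, List.foldl_append]
  rfl

-- p ≥ 2 that is not trial-division prime has a prime factor q with q < p and q*q ≤ p
theorem composite_has_small_prime_factor (p : Int) (h2 : 2 ≤ p) (hnp : ¬ IsPrimeI p) :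
    ∃ q : Int, IsPrimeI q ∧ q < p ∧ q ∣ p ∧ q * q ≤ p := by
  have hnotprime : ¬ Nat.Prime p.toNat := fun h => hnp ((isPrimeI_iff_natPrime p h2).mpr h)
  have hpos : 0 < p.toNat := by omega
  set q := p.toNat.minFac with hq
  have hqprime : Nat.Prime q := Nat.minFac_prime (by omega)
  have hqdvd : q ∣ p.toNat := Nat.minFac_dvd _
  have hqsq : q * q ≤ p.toNat := by
    have := Nat.minFac_sq_le_self hpos hnotprime
    nlinarith [this]
  have hqlt : q < p.toNat := by
    have hle : q ≤ p.toNat := Nat.minFac_le hpos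
    rcases lt_or_eq_of_le hle with h | h
    · exact h
    · exact absurd (h ▸ hqprime) hnotprime
  refine ⟨(q : Int), (isPrimeI_iff_natPrime _ (by exact_mod_cast hqprime.two_le)).mpr (by simpa using hqprime), by omega, ?_, ?_⟩
  · have : ((q : Int)) ∣ ((p.toNat : Int)) := Int.natCast_dvd_natCast.mpr hqdvd
    rwa [Int.toNat_of_nonneg (by omega)] at this
  · have : ((q * q : Nat) : Int) ≤ ((p.toNat : Nat) : Int) := by exact_mod_cast hqsq
    push_cast at this
    omega

theorem sieve_inv (limit : Int) :
    ∀ (j : Nat) (k : Int), k = 2 + (j : Int) → k ≤ limit + 1 →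
      (sieveState limit k).1.size = (limit + 1).toNat ∧
      (∀ m : Int, 0 ≤ m → m ≤ limit →
        ((sieveState limit k).1.getD m.toNat false = true ↔
          ∃ q : Int, IsPrimeI q ∧ q < k ∧ q ∣ m ∧ q * q ≤ m)) ∧
      (∀ p : Int, p ∈ (sieveState limit k).2 ↔ IsPrimeI p ∧ p < k) := by
  intro j
  induction j with
  | zero =>
    intro k hk _
    have : sieveState limit k = (Array.replicate (limit + 1).toNat false, []) := by
      unfold sieveState
      rw [PySem.List.pyRange_one_eq_nil (by omega)]
      rfl
    rw [this]
    refine ⟨by simp, ?_, ?_⟩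
    · intro m _ _
      constructor
      · intro h
        exfalso
        revert h
        simp [Array.getD_eq_getD_getElem?, Array.getElem?_replicate]
        split <;> simp
      · rintro ⟨q, hq, hlt, _⟩
        exact absurd hq.1 (by omega)
    · intro p
      simp only [List.not_mem_nil, false_iff, not_and]
      intro hq
      have := hq.1
      omega
  | succ j ih =>
    intro k hk hkle
    have hkj : k = (2 + (j : Int)) + 1 := by push_cast at hk ⊢; omega
    set kp := 2 + (j : Int) with hkp
    have h2kp : 2 ≤ kp := by omega
    have hkple : kp ≤ limit := by omega
    obtain ⟨ihsz, ihcomp, ihprimes⟩ := ih kp rfl (by omega)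
    rw [hkj, sieveState_succ limit kp h2kp]
    -- the tested flag: comp[kp] = true ↔ kp is not prime
    have hflag : ((sieveState limit kp).1.getD kp.toNat false = true) ↔ ¬ IsPrimeI kp := by
      rw [ihcomp kp (by omega) hkple]
      constructor
      · rintro ⟨q, hq, hlt, hdvd, _⟩ hP
        exact hP.2 q hq.1 hlt hdvd
      · intro hnp
        obtain ⟨q, hq, hlt, hdvd, hsq⟩ := composite_has_small_prime_factor kp h2kp hnp
        exact ⟨q, hq, hlt, hdvd, hsq⟩
    unfold sieveStep
    by_cases hP : IsPrimeI kp
    · rw [if_pos (by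
        rcases Bool.eq_false_or_eq_true ((sieveState limit kp).1.getD kp.toNat false) with h | h
        · exact absurd (hflag.mp h) (not_not_intro hP)
        · exact h)]
      refine ⟨?_, ?_, ?_⟩
      · simpa [markMultiples, markFold_size] using ihsz
      · intro m h0 hm
        rw [markMultiples_getD limit kp _ h2kp ihsz m h0 hm, ihcomp m h0 hm]
        constructor
        · rintro (⟨q, hq, hlt, hdvd, hsq⟩ | ⟨hdvd, hsq⟩)
          · exact ⟨q, hq, by omega, hdvd, hsq⟩
          · exact ⟨kp, hP, by omega, hdvd, hsq⟩
        · rintro ⟨q, hq, hlt, hdvd, hsq⟩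
          by_cases hqkp : q = kp
          · exact Or.inr ⟨hqkp ▸ hdvd, hqkp ▸ hsq⟩
          · exact Or.inl ⟨q, hq, by omega, hdvd, hsq⟩
      · intro p
        simp only [List.mem_append, List.mem_singleton, ihprimes]
        constructor
        · rintro (⟨h, hlt⟩ | rfl)
          · exact ⟨h, by omega⟩
          · exact ⟨hP, by omega⟩
        · rintro ⟨h, hlt⟩
          by_cases hpkp : p = kp
          · exact Or.inr hpkp
          · exact Or.inl ⟨h, by omega⟩
    · rw [if_neg (by
        rcases Bool.eq_false_or_eq_true ((sieveState limit kp).1.getD kp.toNat false) with h | h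
        · simp [h]
        · exact absurd (hflag.mpr hP) (by simp [h]))]
      refine ⟨ihsz, ?_, ?_⟩
      · intro m h0 hm
        rw [ihcomp m h0 hm]
        constructor
        · rintro ⟨q, hq, hlt, hdvd, hsq⟩
          exact ⟨q, hq, by omega, hdvd, hsq⟩
        · rintro ⟨q, hq, hlt, hdvd, hsq⟩
          by_cases hqkp : q = kp
          · exact absurd (hqkp ▸ hq) hP
          · exact ⟨q, hq, by omega, hdvd, hsq⟩
      · intro p
        rw [ihprimes p]
        constructor
        · rintro ⟨h, hlt⟩
          exact ⟨h, by omega⟩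
        · rintro ⟨h, hlt⟩
          by_cases hpkp : p = kp
          · exact absurd (hpkp ▸ h) hP
          · exact ⟨h, by omega⟩

theorem sievePrimes_mem (limit : Int) (h1 : 1 ≤ limit) (p : Int) :
    p ∈ sievePrimes limit ↔ IsPrimeI p ∧ p ≤ limit := by
  have heq : sievePrimes limit = (sieveState limit (limit + 1)).2 := rfl
  have := (sieve_inv limit (limit - 1).toNat (limit + 1) (by omega) le_rfl).2.2 p
  rw [heq, this]
  constructor <;> rintro ⟨h, hl⟩ <;> exact ⟨h, by omega⟩

theorem isPrimeB_iff (primes : List Int) (limit top n : Int)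
    (hprimes : ∀ p, p ∈ primes ↔ IsPrimeI p ∧ p ≤ limit) (hl1 : 1 ≤ limit)
    (hlim : ¬ ((limit + 1) * (limit + 1) ≤ top)) (hn : n ≤ top) :
    isPrimeB primes n = true ↔ 2 ≤ n ∧ ∀ d : Int, 2 ≤ d → d * d ≤ n → ¬ d ∣ n := by
  unfold isPrimeB
  by_cases h2 : n < 2
  · rw [if_pos h2]
    simp only [Bool.false_eq_true, false_iff]
    intro h
    omega
  · rw [if_neg h2]
    rw [List.all_eq_true]
    constructor
    · intro h
      refine ⟨by omega, ?_⟩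
      intro d hd2 hdd hdvd
      obtain ⟨q, hq, hqq, hqdvd⟩ := exists_small_prime_factor n d hd2 hdd hdvd
      have hq2 : 2 ≤ q := hq.1
      have hqlim : q ≤ limit := by nlinarith
      have hqmem : q ∈ primes.filter (fun p => decide (p * p ≤ n)) :=
        List.mem_filter.mpr ⟨(hprimes q).mpr ⟨hq, hqlim⟩, by simpa using hqq⟩
      have := h q hqmem
      simp only [bne_iff_ne, ne_eq] at this
      exact this ((PySem.Int.mod_eq_zero_iff_dvd n q).mpr hqdvd)
    · intro h p hp
      obtain ⟨hpmem, hple⟩ := List.mem_filter.mp hp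
      obtain ⟨hP, _⟩ := (hprimes p).mp hpmem
      simp only [bne_iff_ne, ne_eq]
      intro hmod
      exact h.2 p hP.1 (by simpa using hple) ((PySem.Int.mod_eq_zero_iff_dvd n p).mp hmod)

-- ===== VERDICT (by name: the statement is the Claim_ definition above) =====
theorem product_of_primes_spec : Claim_equal_product_of_primes := by
  intro array _
  unfold Spec_product_of_primes product_of_primes product_of_primes_alt
  have htop := topOf_spec array
  have hll := limitLoop_spec (topOf array) 1
  have hsv := sievePrimes_mem (limitLoop (topOf array) 1) hll.1
  symm
  apply PySem.List.foldl_congr_mem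
  intro acc num hmem
  have hA := isPrimeA_iff num
  have hB := isPrimeB_iff (sievePrimes (limitLoop (topOf array) 1)) (limitLoop (topOf array) 1)
      (topOf array) num hsv hll.1 hll.2 (htop.2 num hmem)
  have : isPrimeB (sievePrimes (limitLoop (topOf array) 1)) num = isPrimeA num := by
    rw [Bool.eq_iff_iff, hA, hB]
  rw [this]
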